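-- pv_equiv track=rewrite | github.com/zbldqhub/tomokx-skill | scripts-openclaw/analyze_history.py | dominant_trend_per_day
-- ===== SOURCE A (Python) =====
-- def dominant_trend_per_day(entries):
--     day_trends = {}
--     for e in entries:
--         d = e.get("timestamp", "")[:10] if "timestamp" in e else e.get("date", "")
--         if not d:
--             continue
--         t = e.get("trend", "unknown").lower()
--         if d not in day_trends:
--             day_trends[d] = {}
--         day_trends[d][t] = day_trends[d].get(t, 0) + 1
--     result = {}
--     for d, counts in day_trends.items():
--         result[d] = max(counts, key=counts.get)
--     return result
-- ===== SOURCE B (Python) =====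
-- def dominant_trend_per_day(entries):
--     def day_of(e):
--         return e.get("timestamp", "")[:10] if "timestamp" in e else e.get("date", "")
--     pairs = [(day_of(e), e.get("trend", "unknown").lower())
--              for e in entries if day_of(e)]
--     result = {}
--     for day in dict.fromkeys(d for d, _ in pairs):
--         trends = [t for d, t in pairs if d == day]
--         result[day] = max(trends, key=trends.count)
--     return result
-- ===== Notes on version B (the rewrite author's own statement) =====
-- stated objective: alternative
-- what changed: Replaced the incremental nested dict-of-counters with a flat extraction of (day, trend) pairs, an ordered dedup of the days, and a per-day argmax over the raw trend occurrences keyed by list.count.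
import Mathlib
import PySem

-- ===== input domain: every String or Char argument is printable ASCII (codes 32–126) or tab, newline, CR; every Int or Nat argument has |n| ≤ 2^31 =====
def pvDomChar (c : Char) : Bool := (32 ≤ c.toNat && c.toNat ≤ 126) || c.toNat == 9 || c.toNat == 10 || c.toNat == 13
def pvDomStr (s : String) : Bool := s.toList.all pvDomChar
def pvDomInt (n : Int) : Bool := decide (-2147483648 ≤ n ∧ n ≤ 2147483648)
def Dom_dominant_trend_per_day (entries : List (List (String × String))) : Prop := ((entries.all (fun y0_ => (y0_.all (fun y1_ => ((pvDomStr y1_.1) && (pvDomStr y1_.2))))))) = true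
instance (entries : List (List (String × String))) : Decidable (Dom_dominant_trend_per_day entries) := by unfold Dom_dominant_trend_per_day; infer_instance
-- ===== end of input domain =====

-- B replaces A's incremental nested dict-of-counters with a flat (day, trend) pair extraction,
-- an ordered dedup of the days, and a per-day argmax over the raw trend occurrences (alternative
-- decomposition, not claimed faster).

-- ===== PORT A =====
def dominant_trend_per_day (entries : List (List (String × String))) : List (String × String) :=
  let day_trends : PySem.Dict String (PySem.Dict String Int) :=
    entries.foldl (fun dt e =>
      let d := if PySem.Dict.contains ⟨e⟩ "timestamp"
               then PySem.Str.slice (PySem.Dict.getD ⟨e⟩ "timestamp" "") none (some 10)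
               else PySem.Dict.getD ⟨e⟩ "date" ""
      if d = "" then dt
      else
        let t := PySem.Str.lower (PySem.Dict.getD ⟨e⟩ "trend" "unknown")
        let dt1 := if dt.contains d then dt else dt.insert d PySem.Dict.empty
        dt1.insert d ((dt1.getD d PySem.Dict.empty).insert t
          ((dt1.getD d PySem.Dict.empty).getD t 0 + 1))) PySem.Dict.empty
  let result : PySem.Dict String String :=
    day_trends.items.foldl (fun r p =>
      -- max(counts, key=counts.get); counts is never empty, so the .getD "" default is unreachable
      r.insert p.1 ((PySem.List.max? p.2.keys (fun k => p.2.getD k 0)).getD "")) PySem.Dict.empty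
  result.items

-- ===== PORT B =====
-- day_of(e) from Source B
def pvDayOf (e : List (String × String)) : String :=
  if PySem.Dict.contains ⟨e⟩ "timestamp"
  then PySem.Str.slice (PySem.Dict.getD ⟨e⟩ "timestamp" "") none (some 10)
  else PySem.Dict.getD ⟨e⟩ "date" ""

def dominant_trend_per_day_alt (entries : List (List (String × String))) : List (String × String) :=
  let pairs : List (String × String) :=
    (entries.filter (fun e => !(pvDayOf e == ""))).map
      (fun e => (pvDayOf e, PySem.Str.lower (PySem.Dict.getD ⟨e⟩ "trend" "unknown")))
  let result : PySem.Dict String String :=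
    (PySem.List.dedup (pairs.map (·.1))).foldl (fun r day =>
      let trends := (pairs.filter (fun p => p.1 == day)).map (·.2)
      -- max(trends, key=trends.count); trends is never empty, so the .getD "" default is unreachable
      r.insert day ((PySem.List.max? trends (fun t => (trends.count t : Int))).getD "")) PySem.Dict.empty
  result.items

-- ===== PRECONDITION & SPEC =====
def Spec_dominant_trend_per_day (entries : List (List (String × String))) (out : List (String × String)) : Prop := out = dominant_trend_per_day_alt entries
instance (entries : List (List (String × String))) (out : List (String × String)) : Decidable (Spec_dominant_trend_per_day entries out) := by unfold Spec_dominant_trend_per_day; infer_instance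

-- ===== CLAIM (what is proved, stated in full; the proofs are below) =====
def Claim_equal_dominant_trend_per_day : Prop := ∀ (entries : List (List (String × String))), Dom_dominant_trend_per_day entries → Spec_dominant_trend_per_day entries (dominant_trend_per_day entries)

-- ===== LEMMAS AND PROOFS =====

-- A's per-pair update on the day_trends dict
def pvStepA (dt : PySem.Dict String (PySem.Dict String Int)) (p : String × String) :
    PySem.Dict String (PySem.Dict String Int) :=
  let dt1 := if dt.contains p.1 then dt else dt.insert p.1 PySem.Dict.empty
  dt1.insert p.1 ((dt1.getD p.1 PySem.Dict.empty).insert p.2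
    ((dt1.getD p.1 PySem.Dict.empty).getD p.2 0 + 1))

lemma pvItems_mk {k v : Type} (L : List (k × v)) : (PySem.Dict.mk L).items = L := rfl

-- the (day, trend) pair list B extracts
def pvPairs (entries : List (List (String × String))) : List (String × String) :=
  (entries.filter (fun e => !(pvDayOf e == ""))).map
    (fun e => (pvDayOf e, PySem.Str.lower (PySem.Dict.getD ⟨e⟩ "trend" "unknown")))

-- the trends of one day, in encounter order
def pvTrendsOf (pairs : List (String × String)) (day : String) : List String :=
  (pairs.filter (fun p => p.1 == day)).map (·.2)

-- A's entry loop is pvStepA folded over the pair list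
lemma pvFoldA_eq_pairs (entries : List (List (String × String)))
    (dt : PySem.Dict String (PySem.Dict String Int)) :
    entries.foldl (fun dt e =>
      let d := if PySem.Dict.contains ⟨e⟩ "timestamp"
               then PySem.Str.slice (PySem.Dict.getD ⟨e⟩ "timestamp" "") none (some 10)
               else PySem.Dict.getD ⟨e⟩ "date" ""
      if d = "" then dt
      else
        let t := PySem.Str.lower (PySem.Dict.getD ⟨e⟩ "trend" "unknown")
        let dt1 := if dt.contains d then dt else dt.insert d PySem.Dict.empty
        dt1.insert d ((dt1.getD d PySem.Dict.empty).insert t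
          ((dt1.getD d PySem.Dict.empty).getD t 0 + 1))) dt
    = (pvPairs entries).foldl pvStepA dt := by
  rw [pvPairs, List.foldl_map, List.foldl_filter]
  congr 1
  funext a e
  show (if pvDayOf e = "" then a
        else pvStepA a (pvDayOf e, PySem.Str.lower (PySem.Dict.getD ⟨e⟩ "trend" "unknown")))
      = _
  by_cases h : pvDayOf e = ""
  · rw [if_pos h, if_neg (by simp [h])]
  · rw [if_neg h, if_pos (by simp [h])]

-- find? over a keyed map of a Nodup key list
lemma pvFind_map {ν : Type} (days : List String) (g : String → ν) (d : String)
    (hnd : days.Nodup) (hd : d ∈ days) :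
    (days.map (fun x => (x, g x))).find? (fun p => p.1 == d) = some (d, g d) := by
  induction days with
  | nil => cases hd
  | cons x xs ih =>
    by_cases hx : x = d
    · subst hx; simp
    · rw [List.map_cons, List.find?_cons_of_neg (by simpa using hx)]
      exact ih hnd.of_cons ((List.mem_cons.1 hd).resolve_left (fun h => hx h.symm))

lemma pvFind_map_none {ν : Type} (days : List String) (g : String → ν) (d : String)
    (hd : d ∉ days) :
    (days.map (fun x => (x, g x))).find? (fun p => p.1 == d) = none := by
  induction days with
  | nil => rfl
  | cons x xs ih =>
    rw [List.map_cons, List.find?_cons_of_neg (by simp; rintro rfl; exact hd List.mem_cons_self)]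
    exact ih (fun h => hd (List.mem_cons_of_mem _ h))

lemma pvDedup_snoc {α : Type} [BEq α] [LawfulBEq α] (xs : List α) (x : α) :
    PySem.List.dedup (xs ++ [x]) =
      if x ∈ xs then PySem.List.dedup xs else PySem.List.dedup xs ++ [x] := by
  simp only [PySem.List.dedup_eq_ofList, PySem.Set.ofList_eq_foldl, List.foldl_append,
    List.foldl_cons, List.foldl_nil, PySem.Set.add]
  rw [← PySem.Set.ofList_eq_foldl]
  by_cases h : x ∈ xs
  · rw [if_pos (by simpa [PySem.Set.contains] using (PySem.Set.mem_ofList xs x).2 h), if_pos h]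
  · rw [if_neg (by simpa [PySem.Set.contains] using fun hc => h ((PySem.Set.mem_ofList xs x).1 hc)), if_neg h]

lemma pvTrendsOf_snoc (pairs : List (String × String)) (d t day : String) :
    pvTrendsOf (pairs ++ [(d, t)]) day =
      pvTrendsOf pairs day ++ (if d = day then [t] else []) := by
  simp only [pvTrendsOf, List.filter_append, List.map_append]
  congr 1
  by_cases h : d = day
  · simp [List.filter, h]
  · rw [if_neg h]
    simp [show (d == day) = false from by simpa using h]

-- the day_trends dict built by pvStepA, characterised
lemma pvFoldA_items (pairs : List (String × String)) :
    ((pairs.foldl pvStepA PySem.Dict.empty).items) =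
      (PySem.List.dedup (pairs.map (·.1))).map
        (fun day => (day, PySem.Dict.counter (pvTrendsOf pairs day))) := by
  induction pairs using List.reverseRecOn with
  | nil => rfl
  | append_singleton pairs p ih =>
    obtain ⟨d, t⟩ := p
    rw [List.foldl_append, List.foldl_cons, List.foldl_nil]
    have hdays : (PySem.List.dedup (pairs.map (·.1))).Nodup := by
      rw [PySem.List.dedup_eq_ofList]; exact PySem.Set.nodup_ofList _
    have hmem : ∀ x, x ∈ PySem.List.dedup (pairs.map (·.1)) ↔ x ∈ pairs.map (·.1) := by
      intro x; rw [PySem.List.dedup_eq_ofList]; exact PySem.Set.mem_ofList _ _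
    set days := PySem.List.dedup (pairs.map (·.1)) with hdaysdef
    set g := fun day => (day, PySem.Dict.counter (pvTrendsOf pairs day)) with hg
    have hcont : (pairs.foldl pvStepA PySem.Dict.empty).contains d = (decide (d ∈ days)) := by
      rw [PySem.Dict.contains, ih]
      rcases Classical.em (d ∈ days) with h | h
      · simp only [decide_eq_true h, List.any_eq_true]
        exact ⟨g d, List.mem_map_of_mem h, by simp [hg]⟩
      · simp only [decide_eq_false h, List.any_eq_false]
        rintro p hp
        obtain ⟨day, hday, rfl⟩ := List.mem_map.1 hp
        simp [hg]
        rintro rfl; exact h hday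
    simp only [List.map_append, List.map_cons, List.map_nil, pvDedup_snoc, ← hdaysdef]
    by_cases hd : d ∈ pairs.map (·.1)
    · -- a day already seen: the inner counter is updated in place
      have hdd : d ∈ days := (hmem d).2 hd
      rw [if_pos hd]
      have hget : (pairs.foldl pvStepA PySem.Dict.empty).getD d PySem.Dict.empty
          = PySem.Dict.counter (pvTrendsOf pairs d) := by
        rw [PySem.Dict.getD, PySem.Dict.get?, ih, hg]
        rw [pvFind_map days _ d hdays hdd]
        rfl
      rw [pvStepA]
      simp only [hcont, decide_eq_true hdd, if_true, hget]
      rw [PySem.Dict.insert]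
      rw [if_pos (by rw [hcont]; exact decide_eq_true hdd)]
      rw [ih]
      simp only [List.map_map]
      apply List.map_congr_left
      intro day hday
      by_cases hed : day = d
      · subst hed
        simp only [Function.comp, hg, beq_self_eq_true, if_true]
        rw [pvTrendsOf_snoc, if_pos rfl, PySem.Dict.counter_append_singleton, PySem.Dict.modify,
          PySem.Dict.getD_counter]
      · simp only [Function.comp, hg]
        rw [if_neg (by simpa using fun h => hed h)]
        rw [pvTrendsOf_snoc, if_neg (fun h => hed h.symm), List.append_nil]
    · -- a fresh day: a new singleton counter is appended
      have hdd : d ∉ days := fun h => hd ((hmem d).1 h)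
      rw [if_neg hd]
      rw [pvStepA]
      simp only [hcont, decide_eq_false hdd, Bool.false_eq_true, if_false]
      have hins : ((pairs.foldl pvStepA PySem.Dict.empty).insert d PySem.Dict.empty).items
          = days.map g ++ [(d, PySem.Dict.empty)] := by
        rw [PySem.Dict.insert, if_neg (by simp [hcont, decide_eq_false hdd]), ih]
      have hget : ((pairs.foldl pvStepA PySem.Dict.empty).insert d PySem.Dict.empty).getD d PySem.Dict.empty
          = PySem.Dict.empty := by
        rw [PySem.Dict.getD, PySem.Dict.get?, hins, List.find?_append]
        rw [hg, pvFind_map_none days _ d hdd]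
        simp
      rw [hget]
      rw [PySem.Dict.insert]
      rw [if_pos (by
        rw [PySem.Dict.contains, hins]
        simp)]
      simp only [pvItems_mk]
      rw [hins, List.map_append, List.map_append]
      congr 1
      · rw [List.map_map]
        apply List.map_congr_left
        intro day hday
        simp only [Function.comp, hg]
        rw [if_neg (by simp; rintro rfl; exact hdd hday)]
        rw [pvTrendsOf_snoc, if_neg (by rintro rfl; exact hdd hday), List.append_nil]
      · simp only [List.map_cons, List.map_nil, beq_self_eq_true, if_true]
        have htr : pvTrendsOf (pairs ++ [(d, t)]) d = [t] := by
          rw [pvTrendsOf_snoc, if_pos rfl]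
          have : pvTrendsOf pairs d = [] := by
            rw [pvTrendsOf, List.filter_eq_nil_iff.2, List.map_nil]
            rintro p hp hpd
            exact absurd (List.mem_map.2 ⟨p, hp, by simpa using hpd⟩) hd
          rw [this]; rfl
        rw [htr]
        rfl

-- the max of a key function over the dedup equals the max over the raw list
lemma pvMax_dedup (ts : List String) (key : String → Int) :
    PySem.List.max? (PySem.List.dedup ts) key = PySem.List.max? ts key := by
  have hstep : ∀ (l : List String) (t : String),
      PySem.List.max? (l ++ [t]) key =
        (match PySem.List.max? l key with
          | none => some t
          | some m => if key m < key t then some t else some m) := by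
    intro l t
    cases hmx : PySem.List.max? l key with
    | none => rw [(PySem.List.max?_eq_none_iff l key).1 hmx]; rfl
    | some m =>
      simp only [PySem.List.max?] at hmx ⊢
      rw [List.foldl_append, hmx]
      rfl
  induction ts using List.reverseRecOn with
  | nil => rfl
  | append_singleton ts t ih =>
    rw [pvDedup_snoc]
    by_cases h : t ∈ ts
    · rw [if_pos h, hstep, ih]
      obtain ⟨m, hm⟩ : ∃ m, PySem.List.max? ts key = some m := by
        cases hmx : PySem.List.max? ts key with
        | none => exact absurd ((PySem.List.max?_eq_none_iff ts key).1 hmx) (by rintro rfl; cases h)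
        | some m => exact ⟨m, rfl⟩
      rw [hm]
      simp [not_lt.2 (PySem.List.max?_isMax hm t h)]
    · rw [if_neg h, hstep, hstep, ih]

-- the per-day picks of the two programs
def pvPickA (c : PySem.Dict String Int) : String :=
  (PySem.List.max? c.keys (fun k => c.getD k 0)).getD ""

def pvPickB (pairs : List (String × String)) (day : String) : String :=
  let trends := (pairs.filter (fun p => p.1 == day)).map (·.2)
  (PySem.List.max? trends (fun t => (trends.count t : Int))).getD ""

-- ===== VERDICT (by name: the statement is the Claim_ definition above) =====
theorem dominant_trend_per_day_spec : Claim_equal_dominant_trend_per_day := by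
  intro entries _
  show dominant_trend_per_day entries = dominant_trend_per_day_alt entries
  rw [dominant_trend_per_day, dominant_trend_per_day_alt]
  rw [pvFoldA_eq_pairs, pvFoldA_items]
  show (List.foldl (fun r p => r.insert p.1 (pvPickA p.2)) PySem.Dict.empty
          ((PySem.List.dedup ((pvPairs entries).map (·.1))).map
            (fun day => (day, PySem.Dict.counter (pvTrendsOf (pvPairs entries) day))))).items
      = (List.foldl (fun r day => r.insert day (pvPickB (pvPairs entries) day)) PySem.Dict.empty
          (PySem.List.dedup ((pvPairs entries).map (·.1)))).items
  set pairs := pvPairs entries with hpairs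
  set days := PySem.List.dedup (pairs.map (·.1)) with hdaysdef
  have hdays : days.Nodup := by
    rw [hdaysdef, PySem.List.dedup_eq_ofList]; exact PySem.Set.nodup_ofList _
  have hA := PySem.Dict.items_foldl_insert_fresh
      (days.map (fun day => (day, PySem.Dict.counter (pvTrendsOf pairs day))))
      (fun p => p.1) (fun p => pvPickA p.2) PySem.Dict.empty
      (by intro a _; rfl)
      (by rw [List.map_map]; simpa [Function.comp_def] using hdays)
  have hB := PySem.Dict.items_foldl_insert_fresh days
      (fun day => day) (pvPickB pairs) PySem.Dict.empty
      (by intro a _; rfl)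
      (by simpa using hdays)
  beta_reduce at hA hB
  rw [hA, hB]
  simp only [List.map_map]
  apply List.map_congr_left
  intro day hday
  simp only [Function.comp]
  congr 1
  show pvPickA (PySem.Dict.counter (pvTrendsOf pairs day)) = pvPickB pairs day
  rw [pvPickA]
  rw [PySem.Dict.keys_counter, ← PySem.List.dedup_eq_ofList]
  rw [show (fun k => (PySem.Dict.counter (pvTrendsOf pairs day)).getD k 0)
        = (fun t => ((pvTrendsOf pairs day).count t : Int)) from
      funext (fun k => PySem.Dict.getD_counter _ k)]
  rw [pvMax_dedup]
  rfl
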